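-- pv_equiv track=rewrite | github.com/zzyu5/intent_ir | pipeline/triton/providers/flaggems/specs.py | _norm_conv2d_nchw
-- ===== SOURCE A (Python) =====
-- from typing import Any, Dict, List
--
-- def _norm_conv2d_nchw(shapes: Dict[str, int]) -> Dict[str, int]:
--     out = dict(shapes)
--     n = max(1, int(out.get("N", 1)))
--     c_in = max(1, int(out.get("C_IN", 3)))
--     c_out = max(1, int(out.get("C_OUT", 8)))
--     kh = max(1, int(out.get("KH", out.get("K", 3))))
--     kw = max(1, int(out.get("KW", out.get("K", 3))))
--     sh = max(1, int(out.get("SH", out.get("STRIDE", 1))))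
--     sw = max(1, int(out.get("SW", out.get("STRIDE", 1))))
--     ph = max(0, int(out.get("PH", out.get("PADDING", 1))))
--     pw = max(0, int(out.get("PW", out.get("PADDING", 1))))
--     dh = max(1, int(out.get("DH", out.get("DILATION", 1))))
--     dw = max(1, int(out.get("DW", out.get("DILATION", 1))))
--     groups = max(1, int(out.get("GROUPS", 1)))
--     groups = min(groups, c_in, c_out)
--     while groups > 1 and ((c_in % groups) != 0 or (c_out % groups) != 0):
--         groups -= 1
--     min_h = max(1, dh * (kh - 1) + 1 - (2 * ph))
--     min_w = max(1, dw * (kw - 1) + 1 - (2 * pw))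
--     out["N"] = n
--     out["C_IN"] = c_in
--     out["C_OUT"] = c_out
--     out["H"] = max(min_h, int(out.get("H", 8)))
--     out["W"] = max(min_w, int(out.get("W", 8)))
--     out["KH"] = kh
--     out["KW"] = kw
--     out["SH"] = sh
--     out["SW"] = sw
--     out["PH"] = ph
--     out["PW"] = pw
--     out["DH"] = dh
--     out["DW"] = dw
--     out["GROUPS"] = groups
--     return out
-- ===== SOURCE B (Python) =====
-- def _norm_conv2d_nchw(shapes):
--     out = dict(shapes)
--
--     def pick(keys, default, floor):
--         for k in keys:
--             if k in out:
--                 return max(floor, int(out[k]))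
--         return max(floor, default)
--
--     n = pick(("N",), 1, 1)
--     c_in = pick(("C_IN",), 3, 1)
--     c_out = pick(("C_OUT",), 8, 1)
--     kh = pick(("KH", "K"), 3, 1)
--     kw = pick(("KW", "K"), 3, 1)
--     sh = pick(("SH", "STRIDE"), 1, 1)
--     sw = pick(("SW", "STRIDE"), 1, 1)
--     ph = pick(("PH", "PADDING"), 1, 0)
--     pw = pick(("PW", "PADDING"), 1, 0)
--     dh = pick(("DH", "DILATION"), 1, 1)
--     dw = pick(("DW", "DILATION"), 1, 1)
--     cap = min(pick(("GROUPS",), 1, 1), c_in, c_out)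
--
--     # groups = largest divisor of gcd(c_in, c_out) not exceeding cap:
--     # Euclid for the gcd, then divisor enumeration up to the square root.
--     a, b = c_in, c_out
--     while b:
--         a, b = b, a % b
--     g = a
--     groups = 1
--     d = 1
--     while d * d <= g:
--         if g % d == 0:
--             if d <= cap and groups < d:
--                 groups = d
--             q = g // d
--             if q <= cap and groups < q:
--                 groups = q
--         d += 1
--
--     h = max(dh * (kh - 1) + 1 - 2 * ph, pick(("H",), 8, 1))
--     w = max(dw * (kw - 1) + 1 - 2 * pw, pick(("W",), 8, 1))
--     for k, v in (("N", n), ("C_IN", c_in), ("C_OUT", c_out), ("H", h),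
--                  ("W", w), ("KH", kh), ("KW", kw), ("SH", sh), ("SW", sw),
--                  ("PH", ph), ("PW", pw), ("DH", dh), ("DW", dw),
--                  ("GROUPS", groups)):
--         out[k] = v
--     return out
-- ===== Notes on version B (the rewrite author's own statement) =====
-- stated objective: alternative
-- what changed: The decrement-until-divides groups loop is replaced by Euclid's gcd of (C_IN, C_OUT) plus enumeration of its divisors up to the square root to pick the largest divisor not exceeding the cap; key defaults are read by a single multi-key lookup helper and the result dict is written by one update loop over (key, value) pairs.
import Mathlib
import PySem

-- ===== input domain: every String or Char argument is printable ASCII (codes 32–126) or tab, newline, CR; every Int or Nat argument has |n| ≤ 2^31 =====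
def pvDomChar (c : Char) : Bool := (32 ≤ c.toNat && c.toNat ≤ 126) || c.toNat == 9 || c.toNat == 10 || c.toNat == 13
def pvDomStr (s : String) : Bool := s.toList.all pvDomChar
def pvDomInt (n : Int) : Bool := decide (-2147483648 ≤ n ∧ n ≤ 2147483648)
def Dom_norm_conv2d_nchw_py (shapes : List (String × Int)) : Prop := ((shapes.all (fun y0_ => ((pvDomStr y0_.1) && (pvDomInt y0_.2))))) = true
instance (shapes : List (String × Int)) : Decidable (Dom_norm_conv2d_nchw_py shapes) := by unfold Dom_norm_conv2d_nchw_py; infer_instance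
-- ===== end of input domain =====

-- B computes the groups value differently: instead of A's decrement-until-divides loop it
-- takes the largest divisor of gcd(C_IN, C_OUT) not exceeding the cap, found by Euclid's
-- algorithm plus divisor enumeration up to the square root (an alternative algorithm).

-- ===== PORT A =====
-- while groups > 1 and ((c_in % groups) != 0 or (c_out % groups) != 0): groups -= 1
def pvGroupsLoopA (cIn cOut g : Int) : Int :=
  if h : 1 < g ∧ (PySem.Int.mod cIn g ≠ 0 ∨ PySem.Int.mod cOut g ≠ 0) then
    pvGroupsLoopA cIn cOut (g - 1)
  else g
termination_by g.toNat
decreasing_by omega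

def norm_conv2d_nchw_py (shapes : List (String × Int)) : List (String × Int) :=
  let out := PySem.Dict.ofList shapes
  let n := max 1 (out.getD "N" 1)
  let c_in := max 1 (out.getD "C_IN" 3)
  let c_out := max 1 (out.getD "C_OUT" 8)
  let kh := max 1 (out.getD "KH" (out.getD "K" 3))
  let kw := max 1 (out.getD "KW" (out.getD "K" 3))
  let sh := max 1 (out.getD "SH" (out.getD "STRIDE" 1))
  let sw := max 1 (out.getD "SW" (out.getD "STRIDE" 1))
  let ph := max 0 (out.getD "PH" (out.getD "PADDING" 1))
  let pw := max 0 (out.getD "PW" (out.getD "PADDING" 1))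
  let dh := max 1 (out.getD "DH" (out.getD "DILATION" 1))
  let dw := max 1 (out.getD "DW" (out.getD "DILATION" 1))
  let groups0 := max 1 (out.getD "GROUPS" 1)
  let groups1 := min (min groups0 c_in) c_out
  let groups := pvGroupsLoopA c_in c_out groups1
  let min_h := max 1 (dh * (kh - 1) + 1 - 2 * ph)
  let min_w := max 1 (dw * (kw - 1) + 1 - 2 * pw)
  let out := out.insert "N" n
  let out := out.insert "C_IN" c_in
  let out := out.insert "C_OUT" c_out
  let out := out.insert "H" (max min_h (out.getD "H" 8))
  let out := out.insert "W" (max min_w (out.getD "W" 8))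
  let out := out.insert "KH" kh
  let out := out.insert "KW" kw
  let out := out.insert "SH" sh
  let out := out.insert "SW" sw
  let out := out.insert "PH" ph
  let out := out.insert "PW" pw
  let out := out.insert "DH" dh
  let out := out.insert "DW" dw
  let out := out.insert "GROUPS" groups
  out.items

-- ===== PORT B =====
-- def pick(keys, default, floor): first present key's value (floored), else default (floored)
def pvPick (out : PySem.Dict String Int) (keys : List String) (dflt floor : Int) : Int :=
  match keys with
  | [] => max floor dflt
  | k :: rest => if out.contains k then max floor (out.getD k 0) else pvPick out rest dflt floor

-- while b: a, b = b, a % b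
def pvGcd (a b : Int) : Int :=
  if h : b ≠ 0 then pvGcd b (PySem.Int.mod a b) else a
termination_by b.natAbs
decreasing_by
  rcases lt_or_gt_of_ne h with hb | hb
  · have := PySem.Int.mod_neg_bounds a hb; omega
  · have h1 := PySem.Int.mod_nonneg a hb
    have h2 := PySem.Int.mod_lt a hb
    omega

-- while d * d <= g: if g % d == 0: try candidates d and g // d; d += 1
def pvDivLoop (g cap d groups : Int) : Int :=
  if hdd : d * d ≤ g then
    pvDivLoop g cap (d + 1)
      (if PySem.Int.mod g d = 0 then
        let groups1 := if d ≤ cap ∧ groups < d then d else groups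
        let q := PySem.Int.floordiv g d
        if q ≤ cap ∧ groups1 < q then q else groups1
      else groups)
  else groups
termination_by (g + 1 - d).toNat
decreasing_by
  have hdg : d ≤ g := by
    by_cases h0 : d ≤ 0
    · exact le_trans h0 (le_trans (mul_self_nonneg d) hdd)
    · nlinarith
  omega

def norm_conv2d_nchw_py_alt (shapes : List (String × Int)) : List (String × Int) :=
  let out := PySem.Dict.ofList shapes
  let n := pvPick out ["N"] 1 1
  let c_in := pvPick out ["C_IN"] 3 1
  let c_out := pvPick out ["C_OUT"] 8 1
  let kh := pvPick out ["KH", "K"] 3 1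
  let kw := pvPick out ["KW", "K"] 3 1
  let sh := pvPick out ["SH", "STRIDE"] 1 1
  let sw := pvPick out ["SW", "STRIDE"] 1 1
  let ph := pvPick out ["PH", "PADDING"] 1 0
  let pw := pvPick out ["PW", "PADDING"] 1 0
  let dh := pvPick out ["DH", "DILATION"] 1 1
  let dw := pvPick out ["DW", "DILATION"] 1 1
  let cap := min (min (pvPick out ["GROUPS"] 1 1) c_in) c_out
  let g := pvGcd c_in c_out
  let groups := pvDivLoop g cap 1 1
  let h := max (dh * (kh - 1) + 1 - 2 * ph) (pvPick out ["H"] 8 1)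
  let w := max (dw * (kw - 1) + 1 - 2 * pw) (pvPick out ["W"] 8 1)
  (([("N", n), ("C_IN", c_in), ("C_OUT", c_out), ("H", h), ("W", w), ("KH", kh),
    ("KW", kw), ("SH", sh), ("SW", sw), ("PH", ph), ("PW", pw), ("DH", dh),
    ("DW", dw), ("GROUPS", groups)] : List (String × Int)).foldl
      (fun d kv => d.insert kv.1 kv.2) out).items

-- ===== PRECONDITION & SPEC =====
def Spec_norm_conv2d_nchw_py (shapes : List (String × Int)) (out : List (String × Int)) : Prop := out = norm_conv2d_nchw_py_alt shapes
instance (shapes : List (String × Int)) (out : List (String × Int)) : Decidable (Spec_norm_conv2d_nchw_py shapes out) := by unfold Spec_norm_conv2d_nchw_py; infer_instance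

-- ===== CLAIM (what is proved, stated in full; the proofs are below) =====
def Claim_equal_norm_conv2d_nchw_py : Prop := ∀ (shapes : List (String × Int)), Dom_norm_conv2d_nchw_py shapes → Spec_norm_conv2d_nchw_py shapes (norm_conv2d_nchw_py shapes)

-- ===== LEMMAS AND PROOFS =====

lemma pvPick_one (out : PySem.Dict String Int) (k : String) (dflt fl : Int) :
    pvPick out [k] dflt fl = max fl (out.getD k dflt) := by
  simp only [pvPick]
  rcases h : out.get? k with _ | v
  · rw [PySem.Dict.contains_eq_isSome_get?, h]
    simp [PySem.Dict.getD_of_get?_eq_none _ _ h]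
  · rw [PySem.Dict.contains_eq_isSome_get?, h]
    simp [PySem.Dict.getD_of_get?_eq_some _ _ h]

lemma pvPick_two (out : PySem.Dict String Int) (k1 k2 : String) (dflt fl : Int) :
    pvPick out [k1, k2] dflt fl = max fl (out.getD k1 (out.getD k2 dflt)) := by
  simp only [pvPick]
  rcases h : out.get? k1 with _ | v
  · rw [PySem.Dict.contains_eq_isSome_get?, h]
    simp only [Option.isSome_none, Bool.false_eq_true, if_false,
      PySem.Dict.getD_of_get?_eq_none _ _ h]
    exact pvPick_one out k2 dflt fl
  · rw [PySem.Dict.contains_eq_isSome_get?, h]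
    simp [PySem.Dict.getD_of_get?_eq_some _ _ h]

lemma pvGroupsLoopA_spec (c c' : Int) : ∀ (g : Int), 1 ≤ g →
    pvGroupsLoopA c c' g ∣ c ∧ pvGroupsLoopA c c' g ∣ c' ∧ 1 ≤ pvGroupsLoopA c c' g ∧
      pvGroupsLoopA c c' g ≤ g ∧
      ∀ x, 1 ≤ x → x ≤ g → x ∣ c → x ∣ c' → x ≤ pvGroupsLoopA c c' g := by
  intro g
  induction g using pvGroupsLoopA.induct (cIn := c) (cOut := c') with
  | case1 g hcond ih =>
    intro hg
    rw [pvGroupsLoopA, dif_pos hcond]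
    obtain ⟨hg1, hmod⟩ := hcond
    obtain ⟨h1, h2, h3, h4, h5⟩ := ih (by omega)
    refine ⟨h1, h2, h3, by omega, ?_⟩
    intro x hx1 hx2 hxc hxc'
    rcases eq_or_lt_of_le hx2 with rfl | hlt
    · exfalso
      rcases hmod with hm | hm
      · exact hm ((PySem.Int.mod_eq_zero_iff_dvd c x).mpr hxc)
      · exact hm ((PySem.Int.mod_eq_zero_iff_dvd c' x).mpr hxc')
    · exact h5 x hx1 (by omega) hxc hxc'
  | case2 g hcond =>
    intro hg
    rw [pvGroupsLoopA, dif_neg hcond]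
    push Not at hcond
    rcases eq_or_lt_of_le hg with rfl | hg1
    · exact ⟨one_dvd c, one_dvd c', le_refl 1, le_refl 1, fun x hx1 hx2 _ _ => le_trans hx2 (le_refl 1)⟩
    · obtain ⟨hm1, hm2⟩ := hcond hg1
      exact ⟨(PySem.Int.mod_eq_zero_iff_dvd c g).mp hm1, (PySem.Int.mod_eq_zero_iff_dvd c' g).mp hm2,
        hg, le_refl g, fun x _ hx2 _ _ => hx2⟩

lemma pvGcd_eq : ∀ (a b : Int), 0 ≤ a → 0 ≤ b → pvGcd a b = (Int.gcd a b : Int) := by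
  intro a b
  induction a, b using pvGcd.induct with
  | case1 a b hb ih =>
    intro ha0 hb0
    have hbpos : 0 < b := lt_of_le_of_ne hb0 (Ne.symm hb)
    rw [pvGcd, dif_pos hb]
    rw [PySem.Int.mod_eq_emod_of_pos hbpos] at ih ⊢
    rw [ih hb0 (Int.emod_nonneg a (by omega))]
    rw [Int.gcd_comm b (a % b), Int.gcd_emod]
  | case2 a b hb =>
    intro ha0 _
    have : b = 0 := by omega
    subst this
    rw [pvGcd, dif_neg hb]
    simp [Int.gcd, Int.natAbs_of_nonneg ha0]

lemma pvSandwich (G d x : Int) (hx1 : 1 ≤ x) (hxG : x ∣ G) (hlo : d * x ≤ G)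
    (hhi : G < (d + 1) * x) : G = d * x := by
  have hdvd : x ∣ G - d * x := dvd_sub hxG (dvd_mul_left x d)
  obtain ⟨k, hk⟩ := hdvd
  have hxpos : (0 : Int) < x := hx1
  have h0k : 0 ≤ k := by nlinarith
  have hk1 : k < 1 := by nlinarith
  have : k = 0 := by omega
  subst this
  simp at hk
  omega

lemma pvDivLoop_spec : ∀ (G cap d groups : Int), 1 ≤ G → 1 ≤ cap → 1 ≤ d →
    groups ∣ G → 1 ≤ groups → groups ≤ cap →
    (∀ x, x ∣ G → 1 ≤ x → x ≤ cap → (x < d ∨ G < d * x) → x ≤ groups) →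
    pvDivLoop G cap d groups ∣ G ∧ 1 ≤ pvDivLoop G cap d groups ∧
      pvDivLoop G cap d groups ≤ cap ∧
      ∀ x, x ∣ G → 1 ≤ x → x ≤ cap → x ≤ pvDivLoop G cap d groups := by
  intro G cap d groups
  induction d, groups using pvDivLoop.induct (g := G) (cap := cap) with
  | case1 d groups hdd ih =>
    intro hG hcap hd h1 h2 h3 hinv
    rw [pvDivLoop, dif_pos hdd]
    simp only [dite_eq_ite] at ih
    by_cases hm : PySem.Int.mod G d = 0
    · rw [if_pos hm] at ih ⊢
      have hdpos : (0 : Int) < d := hd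
      have hdG : d ∣ G := (PySem.Int.mod_eq_zero_iff_dvd G d).mp hm
      have hq : PySem.Int.floordiv G d = G / d := PySem.Int.floordiv_eq_ediv_of_pos hdpos
      have hqdvd : PySem.Int.floordiv G d ∣ G := by rw [hq]; exact Int.ediv_dvd_of_dvd hdG
      have hqmul : d * PySem.Int.floordiv G d = G := by rw [hq]; exact Int.mul_ediv_cancel' hdG
      set q := PySem.Int.floordiv G d with hqdef
      have hq1 : 1 ≤ q := by nlinarith
      set groups1 := if d ≤ cap ∧ groups < d then d else groups with hg1
      have hg1facts : groups1 ∣ G ∧ 1 ≤ groups1 ∧ groups1 ≤ cap ∧ groups ≤ groups1 ∧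
          (d ≤ cap → d ≤ groups1) := by
        rw [hg1]; split_ifs with hA
        · exact ⟨hdG, by omega, hA.1, by omega, fun _ => le_refl d⟩
        · refine ⟨h1, h2, h3, le_refl groups, fun hdc => ?_⟩
          rcases not_and_or.mp hA with h | h <;> omega
      set groups2 := if q ≤ cap ∧ groups1 < q then q else groups1 with hg2
      obtain ⟨hg1d, hg1one, hg1cap, hg1mono, hg1dle⟩ := hg1facts
      have hg2facts : groups2 ∣ G ∧ 1 ≤ groups2 ∧ groups2 ≤ cap ∧ groups1 ≤ groups2 ∧
          (q ≤ cap → q ≤ groups2) := by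
        rw [hg2]; split_ifs with hB
        · exact ⟨hqdvd, hq1, hB.1, by omega, fun _ => le_refl q⟩
        · refine ⟨hg1d, hg1one, hg1cap, le_refl groups1, fun hqc => ?_⟩
          rcases not_and_or.mp hB with h | h <;> omega
      obtain ⟨hg2d, hg2one, hg2cap, hg2mono, hg2qle⟩ := hg2facts
      apply ih hG hcap (by omega) hg2d hg2one hg2cap
      intro x hxG hx1 hxcap hcov
      by_cases hold : x < d ∨ G < d * x
      · exact le_trans (hinv x hxG hx1 hxcap hold) (le_trans hg1mono hg2mono)
      · push Not at hold
        obtain ⟨hxd, hGdx⟩ := hold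
        rcases eq_or_lt_of_le hxd with rfl | hxgt
        · exact le_trans (hg1dle hxcap) hg2mono
        · have hhi : G < (d + 1) * x := by
            rcases hcov with h | h
            · omega
            · exact h
          have hGeq : G = d * x := pvSandwich G d x hx1 hxG hGdx hhi
          have hxq : x = q := by
            have : d * q = d * x := by rw [hqmul, hGeq]
            exact (mul_left_cancel₀ (by omega) this).symm
          rw [hxq] at hxcap ⊢
          exact hg2qle hxcap
    · rw [if_neg hm] at ih ⊢
      apply ih hG hcap (by omega) h1 h2 h3
      intro x hxG hx1 hxcap hcov
      apply hinv x hxG hx1 hxcap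
      by_cases hxlt : x < d
      · exact Or.inl hxlt
      · push Not at hxlt
        right
        by_cases hGx : G < d * x
        · exact hGx
        · push Not at hGx
          exfalso
          rcases eq_or_lt_of_le hxlt with rfl | hxgt
          · exact hm ((PySem.Int.mod_eq_zero_iff_dvd G _).mpr hxG)
          · have hhi : G < (d + 1) * x := by
              rcases hcov with h | h
              · omega
              · exact h
            have hGeq : G = d * x := pvSandwich G d x hx1 hxG hGx hhi
            exact hm ((PySem.Int.mod_eq_zero_iff_dvd G d).mpr ⟨x, hGeq⟩)
  | case2 d groups hdd =>
    intro hG hcap hd h1 h2 h3 hinv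
    rw [pvDivLoop, dif_neg hdd]
    refine ⟨h1, h2, h3, ?_⟩
    intro x hxG hx1 hxcap
    apply hinv x hxG hx1 hxcap
    by_cases hxd : x < d
    · exact Or.inl hxd
    · right
      push Not at hxd
      nlinarith

lemma pvGroups_eq (c c' g0 : Int) (hc : 1 ≤ c) (hc' : 1 ≤ c') (hg0 : 1 ≤ g0) :
    pvGroupsLoopA c c' (min (min g0 c) c') = pvDivLoop (pvGcd c c') (min (min g0 c) c') 1 1 := by
  set cap := min (min g0 c) c' with hcap
  have hcap1 : 1 ≤ cap := by omega
  obtain ⟨ha1, ha2, ha3, ha4, ha5⟩ := pvGroupsLoopA_spec c c' cap hcap1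
  rw [pvGcd_eq c c' (by omega) (by omega)]
  have hG1 : 1 ≤ (Int.gcd c c' : Int) := by
    have : c.gcd c' ≠ 0 := by simp [Int.gcd_eq_zero_iff]; omega
    omega
  obtain ⟨hb1, hb2, hb3, hb4⟩ := pvDivLoop_spec (Int.gcd c c') cap 1 1 hG1 hcap1 le_rfl
    (one_dvd _) le_rfl hcap1 (by
      intro x hxG hx1 hxcap hcov
      rcases hcov with h | h
      · omega
      · have := Int.le_of_dvd (by omega) hxG
        omega)
  apply le_antisymm
  · exact hb4 _ (Int.dvd_coe_gcd ha1 ha2) ha3 ha4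
  · exact ha5 _ hb2 hb3 (dvd_trans hb1 (Int.gcd_dvd_left c c')) (dvd_trans hb1 (Int.gcd_dvd_right c c'))

lemma pvMaxShuffle (a b : Int) : max a (max 1 b) = max (max 1 a) b := by omega

-- ===== VERDICT (by name: the statement is the Claim_ definition above) =====
theorem norm_conv2d_nchw_py_spec : Claim_equal_norm_conv2d_nchw_py := by
  intro shapes _
  show norm_conv2d_nchw_py shapes = norm_conv2d_nchw_py_alt shapes
  unfold norm_conv2d_nchw_py norm_conv2d_nchw_py_alt
  simp only [pvPick_one, pvPick_two, List.foldl, PySem.Dict.getD_insert, String.reduceEq,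
    reduceIte]
  rw [pvGroups_eq _ _ _ (le_max_left 1 _) (le_max_left 1 _) (le_max_left 1 _)]
  simp only [pvMaxShuffle]
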